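-- pv_equiv track=rewrite | github.com/cesaranogilbert/ai-agent-ecosystem | services/consciousness_emergence_agent.py | _measure_introspection_depth
-- ===== SOURCE A (Python) =====
-- from typing import Dict, List, Any, Optional, Tuple
--
-- def _measure_introspection_depth(behavioral_data: Dict[str, Any]) -> int:
--     """Measure the depth of introspective capabilities"""
--     introspection_indicators = behavioral_data.get("introspection_indicators", [])
--
--     # Count levels of introspection
--     depth_levels = {
--         "self_monitoring": 1,
--         "self_reflection": 2,
--         "meta_reflection": 3,
--         "meta_meta_reflection": 4,
--         "recursive_introspection": 5
--     }
--
--     max_depth = 0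
--     for indicator in introspection_indicators:
--         depth = depth_levels.get(indicator, 0)
--         max_depth = max(max_depth, depth)
--
--     return max_depth
-- ===== SOURCE B (Python) =====
-- def _measure_introspection_depth(behavioral_data):
--     """Measure the depth of introspective capabilities"""
--     indicators = set(behavioral_data.get("introspection_indicators", []))
--     ranking = [
--         ("recursive_introspection", 5),
--         ("meta_meta_reflection", 4),
--         ("meta_reflection", 3),
--         ("self_reflection", 2),
--         ("self_monitoring", 1),
--     ]
--     for name, depth in ranking:
--         if name in indicators:
--             return depth
--     return 0
-- ===== Notes on version B (the rewrite author's own statement) =====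
-- stated objective: alternative
-- what changed: B scans the fixed depth ranking in descending order and returns the first level present in a set of the indicators, instead of accumulating a running max over the indicator list.
import Mathlib
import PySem

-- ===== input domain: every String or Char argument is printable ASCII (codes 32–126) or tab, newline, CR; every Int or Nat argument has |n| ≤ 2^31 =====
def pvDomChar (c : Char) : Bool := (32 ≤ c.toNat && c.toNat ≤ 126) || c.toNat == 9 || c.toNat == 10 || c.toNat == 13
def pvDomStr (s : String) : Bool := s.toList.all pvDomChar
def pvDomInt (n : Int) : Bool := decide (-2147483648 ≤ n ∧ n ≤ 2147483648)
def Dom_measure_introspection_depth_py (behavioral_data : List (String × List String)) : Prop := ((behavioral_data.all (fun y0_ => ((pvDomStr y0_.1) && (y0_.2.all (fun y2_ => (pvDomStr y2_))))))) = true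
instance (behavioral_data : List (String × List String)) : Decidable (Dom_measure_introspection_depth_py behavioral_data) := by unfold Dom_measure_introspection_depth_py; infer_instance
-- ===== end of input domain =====

-- B scans the fixed depth ranking in descending order and returns the first level whose name
-- is in a set built from the indicators, instead of folding a running max over the indicator list
-- (alternative decomposition, same cost).

-- ===== PORT A =====
def measure_introspection_depth_py (behavioral_data : List (String × List String)) : Int :=
  let introspection_indicators := PySem.Dict.getD (PySem.Dict.mk behavioral_data) "introspection_indicators" []
  let depth_levels : PySem.Dict String Int :=
    PySem.Dict.mk [("self_monitoring", 1), ("self_reflection", 2), ("meta_reflection", 3),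
     ("meta_meta_reflection", 4), ("recursive_introspection", 5)]
  introspection_indicators.foldl
    (fun max_depth indicator => max max_depth (PySem.Dict.getD depth_levels indicator 0)) 0

-- ===== PORT B =====
-- the 'for name, depth in ranking: if name in indicators: return depth' loop of Source B
def altScanRanking (indicators : PySem.Set String) : List (String × Int) → Int
  | [] => 0
  | (name, depth) :: rest =>
      if PySem.Set.contains indicators name then depth else altScanRanking indicators rest

def measure_introspection_depth_py_alt (behavioral_data : List (String × List String)) : Int :=
  let indicators := PySem.Set.ofList (PySem.Dict.getD (PySem.Dict.mk behavioral_data) "introspection_indicators" [])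
  let ranking : List (String × Int) :=
    [("recursive_introspection", 5), ("meta_meta_reflection", 4), ("meta_reflection", 3),
     ("self_reflection", 2), ("self_monitoring", 1)]
  altScanRanking indicators ranking

-- ===== PRECONDITION & SPEC =====
def Spec_measure_introspection_depth_py (behavioral_data : List (String × List String)) (out : Int) : Prop := out = measure_introspection_depth_py_alt behavioral_data
instance (behavioral_data : List (String × List String)) (out : Int) : Decidable (Spec_measure_introspection_depth_py behavioral_data out) := by unfold Spec_measure_introspection_depth_py; infer_instance

-- ===== CLAIM (what is proved, stated in full; the proofs are below) =====
def Claim_equal_measure_introspection_depth_py : Prop := ∀ (behavioral_data : List (String × List String)), Dom_measure_introspection_depth_py behavioral_data → Spec_measure_introspection_depth_py behavioral_data (measure_introspection_depth_py behavioral_data)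

-- ===== LEMMAS AND PROOFS =====

-- nested-if characterisation of B's scan over the fixed ranking, with contains on the raw list
def gDepth (xs : List String) : Int :=
  if xs.contains "recursive_introspection" then 5
  else if xs.contains "meta_meta_reflection" then 4
  else if xs.contains "meta_reflection" then 3
  else if xs.contains "self_reflection" then 2
  else if xs.contains "self_monitoring" then 1
  else 0

def dDepth (s : String) : Int :=
  PySem.Dict.getD
    (PySem.Dict.mk [("self_monitoring", 1), ("self_reflection", 2), ("meta_reflection", 3),
     ("meta_meta_reflection", 4), ("recursive_introspection", 5)]) s 0

lemma gDepth_cons (x : String) (xs : List String) :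
    gDepth (x :: xs) = max (dDepth x) (gDepth xs) := by
  by_cases h5 : x = "recursive_introspection" <;>
  by_cases h4 : x = "meta_meta_reflection" <;>
  by_cases h3 : x = "meta_reflection" <;>
  by_cases h2 : x = "self_reflection" <;>
  by_cases h1 : x = "self_monitoring" <;>
  simp_all [gDepth, dDepth, PySem.Dict.getD, PySem.Dict.get?, List.find?, beq_eq_decide, eq_comm] <;>
  split_ifs <;> omega

lemma dDepth_nonneg (x : String) : (0:Int) ≤ dDepth x := by
  by_cases h5 : x = "recursive_introspection" <;>
  by_cases h4 : x = "meta_meta_reflection" <;>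
  by_cases h3 : x = "meta_reflection" <;>
  by_cases h2 : x = "self_reflection" <;>
  by_cases h1 : x = "self_monitoring" <;>
  simp_all [dDepth, PySem.Dict.getD, PySem.Dict.get?, List.find?, beq_eq_decide, eq_comm]

lemma foldl_eq_gDepth (xs : List String) (m : Int) (hm : 0 ≤ m) :
    xs.foldl (fun a i => max a (dDepth i)) m = max m (gDepth xs) := by
  induction xs generalizing m with
  | nil => simp [gDepth]; omega
  | cons x xs ih =>
    have hd : (0:Int) ≤ dDepth x := dDepth_nonneg x
    simp only [List.foldl_cons]
    rw [ih (max m (dDepth x)) (le_max_of_le_right hd), gDepth_cons]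
    omega

lemma altScan_eq_gDepth (xs : List String) :
    altScanRanking (PySem.Set.ofList xs)
      [("recursive_introspection", 5), ("meta_meta_reflection", 4), ("meta_reflection", 3),
       ("self_reflection", 2), ("self_monitoring", 1)] = gDepth xs := by
  simp [altScanRanking, gDepth]

-- ===== VERDICT (by name: the statement is the Claim_ definition above) =====
theorem measure_introspection_depth_py_spec : Claim_equal_measure_introspection_depth_py := by
  intro bd _
  unfold Spec_measure_introspection_depth_py measure_introspection_depth_py
    measure_introspection_depth_py_alt
  set xs := PySem.Dict.getD (PySem.Dict.mk bd) "introspection_indicators" [] with hxs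
  show xs.foldl _ 0 = _
  rw [show (fun (max_depth : Int) (indicator : String) =>
        max max_depth (PySem.Dict.getD
          (PySem.Dict.mk [("self_monitoring", 1), ("self_reflection", 2), ("meta_reflection", 3),
           ("meta_meta_reflection", 4), ("recursive_introspection", 5)]) indicator 0))
      = fun a i => max a (dDepth i) from rfl]
  rw [foldl_eq_gDepth xs 0 le_rfl, altScan_eq_gDepth]
  unfold gDepth; split_ifs <;> omega
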